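-- pv_equiv track=rewrite | github.com/vbmendes/project-euler | python/019/main.py | count_mondays
-- ===== SOURCE A (Python) =====
-- def count_mondays(years):
--     current_year = 0
--     current_weekday = (0 + 365)%7
--     mondays = 0
--     while current_year < years:
--         months_len = [31, 28, 31, 30, 31, 30, 31, 31, 30, 31, 30, 31]
--         if (current_year + 1901) % 4 == 0:
--             months_len[1] = 29
--         for len in months_len:
--             current_weekday = (current_weekday + len)%7
--             if current_weekday == 0:
--                 mondays += 1
--         current_year += 1
--     return mondays
-- ===== SOURCE B (Python) =====
-- # O(1) closed form: the weekday sequence of A repeats with period 28 years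
-- # (28*365 + 7 leap days = 10227 days = 1461 weeks, and the 4-year leap
-- # pattern also has period 28), so the count is linear in 28-year blocks.
-- _PER_BLOCK = 48
-- _PREFIX = [0, 2, 4, 5, 7, 9, 10, 12, 13, 16, 17, 19, 21, 23, 24, 27,
--            29, 30, 32, 34, 36, 37, 39, 40, 42, 43, 46, 47]
--
-- def count_mondays(years):
--     if years <= 0:
--         return 0
--     q, r = divmod(years, 28)
--     return q * _PER_BLOCK + _PREFIX[r]
-- ===== Notes on version B (the rewrite author's own statement) =====
-- stated objective: faster
-- what changed: Replaced the year-by-year weekday simulation with an O(1) closed form using the 28-year periodicity of A's calendar (precomputed 28-entry prefix table and per-block count 48).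
import Mathlib
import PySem

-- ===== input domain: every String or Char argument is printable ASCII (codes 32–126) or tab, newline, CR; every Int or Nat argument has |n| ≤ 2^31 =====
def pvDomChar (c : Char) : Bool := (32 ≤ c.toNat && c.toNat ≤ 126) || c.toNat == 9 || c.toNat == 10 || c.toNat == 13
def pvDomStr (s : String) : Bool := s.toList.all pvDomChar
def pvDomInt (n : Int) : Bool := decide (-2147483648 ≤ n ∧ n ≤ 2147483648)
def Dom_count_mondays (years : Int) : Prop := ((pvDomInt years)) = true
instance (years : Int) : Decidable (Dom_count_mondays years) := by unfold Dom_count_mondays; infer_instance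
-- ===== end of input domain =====

-- B replaces A's year-by-year weekday simulation with an O(1) closed form built on the
-- 28-year periodicity of A's calendar (a 28-entry prefix table and 48 Mondays per block).

-- ===== PORT A =====
-- inner month fold: current_weekday = (current_weekday + len) % 7; if == 0: mondays += 1
def pyMondayStep (p : Int × Int) (len : Int) : Int × Int :=
  let w := PySem.Int.mod (p.1 + len) 7
  (w, if w == 0 then p.2 + 1 else p.2)

def count_mondays_loop (years current_year current_weekday mondays : Int) : Int :=
  if current_year < years then
    let months_len : List Int := [31, 28, 31, 30, 31, 30, 31, 31, 30, 31, 30, 31]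
    let months_len :=
      if PySem.Int.mod (current_year + 1901) 4 == 0 then months_len.set 1 29 else months_len
    let s := months_len.foldl pyMondayStep (current_weekday, mondays)
    count_mondays_loop years (current_year + 1) s.1 s.2
  else mondays
termination_by (years - current_year).toNat
decreasing_by omega

def count_mondays (years : Int) : Int :=
  count_mondays_loop years 0 (PySem.Int.mod (0 + 365) 7) 0

-- ===== PORT B =====
def pvPerBlock : Int := 48
def pvPrefix : List Int :=
  [0, 2, 4, 5, 7, 9, 10, 12, 13, 16, 17, 19, 21, 23, 24, 27,
   29, 30, 32, 34, 36, 37, 39, 40, 42, 43, 46, 47]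

def count_mondays_alt (years : Int) : Int :=
  if years ≤ 0 then 0
  else
    PySem.Int.floordiv years 28 * pvPerBlock
      + pvPrefix.getD (PySem.Int.mod years 28).toNat 0

-- ===== PRECONDITION & SPEC =====
def Spec_count_mondays (years : Int) (out : Int) : Prop := out = count_mondays_alt years
instance (years : Int) (out : Int) : Decidable (Spec_count_mondays years out) := by unfold Spec_count_mondays; infer_instance

-- ===== CLAIM (what is proved, stated in full; the proofs are below) =====
def Claim_equal_count_mondays : Prop := ∀ (years : Int), Dom_count_mondays years → Spec_count_mondays years (count_mondays years)

-- ===== LEMMAS AND PROOFS =====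

-- year y's month lengths, as A builds them
def pvMonths (cy : Int) : List Int :=
  if PySem.Int.mod (cy + 1901) 4 == 0
  then ([31, 28, 31, 30, 31, 30, 31, 31, 30, 31, 30, 31] : List Int).set 1 29
  else [31, 28, 31, 30, 31, 30, 31, 31, 30, 31, 30, 31]

-- state (weekday, mondays) of A after n full years
def pvRunA : Nat → Int × Int
  | 0 => (PySem.Int.mod (0 + 365) 7, 0)
  | n + 1 => (pvMonths (n : Int)).foldl pyMondayStep (pvRunA n)

-- weekday at the start of year r of a 28-year block
def pvW : List Int :=
  [1, 2, 3, 4, 6, 0, 1, 2, 4, 5, 6, 0, 2, 3, 4, 5, 0, 1, 2, 3, 5, 6, 0, 1, 3, 4, 5, 6]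

theorem pvFoldl_shift (l : List Int) : ∀ (w c : Int),
    l.foldl pyMondayStep (w, c)
      = ((l.foldl pyMondayStep (w, 0)).1, (l.foldl pyMondayStep (w, 0)).2 + c) := by
  induction l with
  | nil => intro w c; simp
  | cons a l ih =>
      intro w c
      simp only [List.foldl_cons, pyMondayStep]
      split
      · rw [ih _ (c + 1), ih _ (0 + 1)]
        simp [Prod.ext_iff]
        ring
      · rw [ih _ c]

set_option maxHeartbeats 1600000 in
theorem pvRunA_closed (n : Nat) :
    pvRunA n = (pvW.getD (n % 28) 0,
      ((n / 28 : Nat) : Int) * 48 + pvPrefix.getD (n % 28) 0) := by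
  induction n with
  | zero => decide
  | succ n ih =>
      have h28 : n % 28 < 28 := Nat.mod_lt _ (by norm_num)
      obtain ⟨r, hrlt, hr⟩ : ∃ r, r < 28 ∧ n % 28 = r := ⟨_, h28, rfl⟩
      show (pvMonths (n : Int)).foldl pyMondayStep (pvRunA n) = _
      rw [ih, hr]
      have hb : PySem.Int.mod ((n : Int) + 1901) 4 = (((r + 1901) % 4 : Nat) : Int) := by
        rw [PySem.Int.mod_eq_emod_of_pos (by norm_num : (0:Int) < 4)]
        omega
      have e1 : (n + 1) % 28 = (r + 1) % 28 := by omega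
      have e2 : (n + 1) / 28 = n / 28 + (r + 1) / 28 := by omega
      rw [e1, e2, pvMonths, hb]
      push_cast
      generalize ((n / 28 : Nat) : Int) = m
      interval_cases r <;>
        · rw [pvFoldl_shift]
          norm_num [pyMondayStep, PySem.Int.mod, Int.fmod_eq_emod, pvW, pvPrefix, Prod.ext_iff]
          try omega

theorem pvLoop_runA (k : Nat) : ∀ (n : Nat),
    count_mondays_loop ((n : Int) + k) n (pvRunA n).1 (pvRunA n).2 = (pvRunA (n + k)).2 := by
  induction k with
  | zero =>
      intro n
      rw [count_mondays_loop]
      simp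
  | succ k ih =>
      intro n
      rw [count_mondays_loop]
      have hlt : (n : Int) < (n : Int) + ((k + 1 : Nat) : Int) := by push_cast; omega
      rw [if_pos hlt]
      simp only [Prod.mk.eta]
      have hfold : (if PySem.Int.mod ((n : Int) + 1901) 4 == 0
            then ([31, 28, 31, 30, 31, 30, 31, 31, 30, 31, 30, 31] : List Int).set 1 29
            else [31, 28, 31, 30, 31, 30, 31, 31, 30, 31, 30, 31]) = pvMonths (n : Int) := rfl
      rw [hfold]
      have hstep : (pvMonths (n : Int)).foldl pyMondayStep (pvRunA n) = pvRunA (n + 1) := rfl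
      rw [hstep, show (n : Int) + ((k + 1 : Nat) : Int) = ((n + 1 : Nat) : Int) + (k : Nat) by
            push_cast; ring,
          show (n : Int) + 1 = ((n + 1 : Nat) : Int) by push_cast; ring,
          ih (n + 1), show n + 1 + k = n + (k + 1) by omega]

-- ===== VERDICT (by name: the statement is the Claim_ definition above) =====
theorem count_mondays_spec : Claim_equal_count_mondays := by
  intro years _
  unfold Spec_count_mondays count_mondays count_mondays_alt
  by_cases hy : years ≤ 0
  · rw [if_pos hy, count_mondays_loop, if_neg (by omega)]
  · rw [if_neg hy]
    obtain ⟨n, rfl⟩ : ∃ m : Nat, years = (m : Int) := ⟨years.toNat, by omega⟩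
    have h := pvLoop_runA n 0
    simp only [Nat.cast_zero, zero_add] at h
    have h1 : (pvRunA 0).1 = PySem.Int.mod (0 + 365) 7 := rfl
    have h2 : (pvRunA 0).2 = 0 := rfl
    rw [h1, h2] at h
    rw [h, pvRunA_closed,
        show PySem.Int.floordiv (n : Int) 28 = ((n / 28 : Nat) : Int) from
          PySem.Int.floordiv_natCast n 28,
        show PySem.Int.mod (n : Int) 28 = ((n % 28 : Nat) : Int) from
          PySem.Int.mod_natCast n 28]
    simp [pvPerBlock]
    have ht : ((n : Int) % 28).toNat = n % 28 := by omega
    rw [ht]
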